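-- pv_equiv track=rewrite | github.com/fazleh2010/etardis-knowledge-graph | src/crawling/dbpedia_handler.py | _map_classes
-- ===== SOURCE A (Python) =====
-- from typing import DefaultDict, Set, Tuple, List
--
-- def _map_classes(super_classes: List) -> str:
--     """
--     Helper function to reduce dbpedia owl super classes to a given set of available labels.
--     :param super_classes: list of dbpedia owl super classes of a node
--     :return:
--     """
--     # TODO: improve mapping by nlp, ml, etc...
--     mapped_class = "Miscellaneous"
--     for c in super_classes:
--         if "event" in c.lower():
--             mapped_class = "Event"
--             break
--         elif any(agent in c.lower() for agent in ["agent", "species", "ethnicgroup", "language"]):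
--             mapped_class = "Agent"
--             break
--         elif "place" in c.lower():
--             mapped_class = "Place"
--             break
--         elif "timeperiod" in c.lower():
--             mapped_class = "TimePeriod"
--             break
--         elif "topicalconcept" in c.lower():
--             mapped_class = "TopicalConcept"
--             break
--         elif "work" in c.lower():
--             mapped_class = "CulturalArtifact"
--             break
--         elif any(mat_obj in c.lower() for mat_obj in ["materialobject", "meanoftransportation", "currency", "device", "food", "chemicalsubstance"]):
--             mapped_class = "MaterialObject"
--             break
--         else:
--             mapped_class = "Miscellaneous"
--     return mapped_class
-- ===== SOURCE B (Python) =====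
-- # B inverts A's loop nesting: instead of scanning elements and testing categories
-- # per element, it scans each category once over the whole (pre-lowercased) list,
-- # records the earliest element index where that category's keywords hit, and
-- # returns the label of the lexicographically smallest (index, priority) pair.
-- # Correct because A's answer is determined by the first matching element (min
-- # index) and, within it, the first matching category (min priority).
-- RULES = [
--     ("Event", ("event",)),
--     ("Agent", ("agent", "species", "ethnicgroup", "language")),
--     ("Place", ("place",)),
--     ("TimePeriod", ("timeperiod",)),
--     ("TopicalConcept", ("topicalconcept",)),
--     ("CulturalArtifact", ("work",)),
--     ("MaterialObject", ("materialobject", "meanoftransportation", "currency",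
--                         "device", "food", "chemicalsubstance")),
-- ]
--
-- def _first_hit(kws, lows):
--     """Index of the first string in lows containing any of kws, else None."""
--     for i, lc in enumerate(lows):
--         if any(k in lc for k in kws):
--             return i
--     return None
--
-- def _map_classes(super_classes):
--     lows = [c.lower() for c in super_classes]
--     best = None  # (index, priority, label) with lexicographically least (index, priority)
--     for prio, (label, kws) in enumerate(RULES):
--         i = _first_hit(kws, lows)
--         if i is not None and (best is None or (i, prio) < (best[0], best[1])):
--             best = (i, prio, label)
--     return best[2] if best is not None else "Miscellaneous"
-- ===== Notes on version B (the rewrite author's own statement) =====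
-- stated objective: alternative
-- what changed: Inverts the loop nesting: instead of A's per-element if/elif chain with break, B pre-lowercases the list, computes for each category the earliest element index where one of its keywords occurs, and returns the label with the lexicographically least (index, priority) pair.
import Mathlib
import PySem

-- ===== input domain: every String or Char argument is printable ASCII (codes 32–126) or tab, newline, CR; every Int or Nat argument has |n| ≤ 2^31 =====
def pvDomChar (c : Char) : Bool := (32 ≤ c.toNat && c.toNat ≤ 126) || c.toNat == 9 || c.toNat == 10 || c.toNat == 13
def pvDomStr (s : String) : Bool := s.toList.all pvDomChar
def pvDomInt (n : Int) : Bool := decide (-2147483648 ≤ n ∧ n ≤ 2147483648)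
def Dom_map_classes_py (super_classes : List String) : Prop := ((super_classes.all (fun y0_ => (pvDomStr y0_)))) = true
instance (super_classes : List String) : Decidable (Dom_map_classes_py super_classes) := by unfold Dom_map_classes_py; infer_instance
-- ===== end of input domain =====

-- B inverts A's loop nesting: one pass per category over the pre-lowercased list,
-- returning the label with the lexicographically least (element index, category priority).


-- ===== PORT A =====
-- literal transliteration of A's loop (mutable accumulator + break = structural recursion;
-- the else branch resets the accumulator to "Miscellaneous" and continues)
def map_classes_py : List String → String
  | [] => "Miscellaneous"
  | c :: rest =>
    if PySem.Str.isIn "event" (PySem.Str.lower c) then "Event"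
    else if ["agent", "species", "ethnicgroup", "language"].any
        (fun agent => PySem.Str.isIn agent (PySem.Str.lower c)) then "Agent"
    else if PySem.Str.isIn "place" (PySem.Str.lower c) then "Place"
    else if PySem.Str.isIn "timeperiod" (PySem.Str.lower c) then "TimePeriod"
    else if PySem.Str.isIn "topicalconcept" (PySem.Str.lower c) then "TopicalConcept"
    else if PySem.Str.isIn "work" (PySem.Str.lower c) then "CulturalArtifact"
    else if ["materialobject", "meanoftransportation", "currency", "device", "food", "chemicalsubstance"].any
        (fun matObj => PySem.Str.isIn matObj (PySem.Str.lower c)) then "MaterialObject"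
    else map_classes_py rest

-- ===== PORT B =====
def pvRules : List (String × List String) :=
  [("Event", ["event"]),
   ("Agent", ["agent", "species", "ethnicgroup", "language"]),
   ("Place", ["place"]),
   ("TimePeriod", ["timeperiod"]),
   ("TopicalConcept", ["topicalconcept"]),
   ("CulturalArtifact", ["work"]),
   ("MaterialObject", ["materialobject", "meanoftransportation", "currency",
                       "device", "food", "chemicalsubstance"])]

-- Source B's _first_hit: index of the first lowercased element containing any keyword
def pvFirstHit (kws : List String) : List String → Option Nat
  | [] => none
  | lc :: rest =>
    if kws.any (fun k => PySem.Str.isIn k lc) then some 0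
    else (pvFirstHit kws rest).map (· + 1)

-- one step of Source B's best-update: replace best if this category hits at a
-- lexicographically smaller (index, priority)
def pvUpd (lows : List String) (best : Option (Nat × Nat × String)) (prio : Nat)
    (rule : String × List String) : Option (Nat × Nat × String) :=
  match pvFirstHit rule.2 lows with
  | none => best
  | some i =>
    match best with
    | none => some (i, prio, rule.1)
    | some (j, q, l) =>
      if i < j ∨ (i = j ∧ prio < q) then some (i, prio, rule.1) else some (j, q, l)

-- Source B's for-loop over enumerate(RULES)
def pvBest (lows : List String) : List (String × List String) → Nat →
    Option (Nat × Nat × String) → Option (Nat × Nat × String)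
  | [], _, best => best
  | r :: rs, p, best => pvBest lows rs (p + 1) (pvUpd lows best p r)

def map_classes_py_alt (super_classes : List String) : String :=
  match pvBest (super_classes.map PySem.Str.lower) pvRules 0 none with
  | some (_, _, l) => l
  | none => "Miscellaneous"

-- ===== PRECONDITION & SPEC =====
def Spec_map_classes_py (super_classes : List String) (out : String) : Prop := out = map_classes_py_alt super_classes
instance (super_classes : List String) (out : String) : Decidable (Spec_map_classes_py super_classes out) := by unfold Spec_map_classes_py; infer_instance

-- ===== CLAIM (what is proved, stated in full; the proofs are below) =====
def Claim_equal_map_classes_py : Prop := ∀ (super_classes : List String), Dom_map_classes_py super_classes → Spec_map_classes_py super_classes (map_classes_py super_classes)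

-- ===== LEMMAS AND PROOFS =====

-- shift of a best-candidate when one unmatched element is prepended
def pvShift : Option (Nat × Nat × String) → Option (Nat × Nat × String) :=
  Option.map (fun t => (t.1 + 1, t.2.1, t.2.2))

theorem pvFirstHit_cons_no (kws : List String) (lc : String) (lows : List String)
    (h : kws.any (fun k => PySem.Str.isIn k lc) = false) :
    pvFirstHit kws (lc :: lows) = (pvFirstHit kws lows).map (· + 1) := by
  rw [show pvFirstHit kws (lc :: lows)
      = if kws.any (fun k => PySem.Str.isIn k lc) then some 0
        else (pvFirstHit kws lows).map (· + 1) from rfl, h]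
  simp

-- if no rule in rs matches lc, pvBest over (lc :: lows) is the shift of pvBest over lows
theorem pvBest_shift (lc : String) (lows : List String) :
    ∀ (rs : List (String × List String)) (p : Nat) (b : Option (Nat × Nat × String)),
    (∀ r ∈ rs, r.2.any (fun k => PySem.Str.isIn k lc) = false) →
    pvBest (lc :: lows) rs p (pvShift b) = pvShift (pvBest lows rs p b) := by
  intro rs
  induction rs with
  | nil => intro p b _; rfl
  | cons r rs ih =>
    intro p b h
    have hr : r.2.any (fun k => PySem.Str.isIn k lc) = false := h r (by simp)
    have hrs : ∀ r' ∈ rs, r'.2.any (fun k => PySem.Str.isIn k lc) = false :=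
      fun r' hr' => h r' (by simp [hr'])
    rw [pvBest, pvBest, ← ih (p + 1) (pvUpd lows b p r) hrs]
    congr 1
    unfold pvUpd
    rw [pvFirstHit_cons_no _ _ _ hr]
    cases hfh : pvFirstHit r.2 lows with
    | none => simp
    | some i =>
      cases b with
      | none => simp [pvShift]
      | some t =>
        obtain ⟨j, q, l⟩ := t
        simp only [Option.map_some, pvShift]
        by_cases hlt : i < j ∨ (i = j ∧ p < q)
        · have : i + 1 < j + 1 ∨ (i + 1 = j + 1 ∧ p < q) := by omega
          simp [hlt]
        · have : ¬ (i + 1 < j + 1 ∨ (i + 1 = j + 1 ∧ p < q)) := by omega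
          simp [hlt]

-- once best sits at index 0 with a priority smaller than all remaining ones, it is final
theorem pvBest_zero_final (lows : List String) :
    ∀ (rs : List (String × List String)) (p p₀ : Nat) (l : String), p₀ < p →
    pvBest lows rs p (some (0, p₀, l)) = some (0, p₀, l) := by
  intro rs
  induction rs with
  | nil => intro p p₀ l _; rfl
  | cons r rs ih =>
    intro p p₀ l hp
    rw [pvBest]
    have : pvUpd lows (some (0, p₀, l)) p r = some (0, p₀, l) := by
      unfold pvUpd
      cases hfh : pvFirstHit r.2 lows with
      | none => rfl
      | some i =>
        show (if i < 0 ∨ (i = 0 ∧ p < p₀) then some (i, p, r.1) else some (0, p₀, l))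
            = some (0, p₀, l)
        rw [if_neg (show ¬ (i < 0 ∨ (i = 0 ∧ p < p₀)) by omega)]
    rw [this, ih (p + 1) p₀ l (by omega)]

-- pvBest splits over list append
theorem pvBest_append (lows : List String) :
    ∀ (rs1 rs2 : List (String × List String)) (p : Nat) (b : Option (Nat × Nat × String)),
    pvBest lows (rs1 ++ rs2) p b = pvBest lows rs2 (p + rs1.length) (pvBest lows rs1 p b) := by
  intro rs1
  induction rs1 with
  | nil => intro rs2 p b; simp [pvBest]
  | cons r rs ih =>
    intro rs2 p b
    rw [List.cons_append, pvBest, pvBest, ih]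
    congr 1
    rw [List.length_cons]
    omega

-- helper: List.any over a singleton
theorem pv_any_one {α : Type} (f : α → Bool) (a : α) : [a].any f = f a := by
  simp

-- the matching category with least priority wins: index 0 beats every shifted candidate
theorem pvBest_first_match (lc : String) (lows : List String)
    (pre : List (String × List String)) (r : String × List String)
    (post : List (String × List String))
    (hpre : ∀ q ∈ pre, q.2.any (fun k => PySem.Str.isIn k lc) = false)
    (hr : r.2.any (fun k => PySem.Str.isIn k lc) = true) :
    pvBest (lc :: lows) (pre ++ r :: post) 0 none = some (0, pre.length, r.1) := by
  rw [pvBest_append]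
  have h1 : pvBest (lc :: lows) pre 0 none = pvShift (pvBest lows pre 0 none) :=
    pvBest_shift lc lows pre 0 none hpre
  rw [h1, pvBest]
  have h2 : pvUpd (lc :: lows) (pvShift (pvBest lows pre 0 none)) (0 + pre.length) r
      = some (0, pre.length, r.1) := by
    unfold pvUpd
    have hf : pvFirstHit r.2 (lc :: lows) = some 0 := by
      rw [show pvFirstHit r.2 (lc :: lows)
          = if r.2.any (fun k => PySem.Str.isIn k lc) then some 0
            else (pvFirstHit r.2 lows).map (· + 1) from rfl, hr]
      rfl
    rw [hf]
    cases pvBest lows pre 0 none with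
    | none => simp [pvShift]
    | some t =>
      show (if (0:Nat) < t.1 + 1 ∨ ((0:Nat) = t.1 + 1 ∧ 0 + pre.length < t.2.1)
            then some (0, 0 + pre.length, r.1) else _) = some (0, pre.length, r.1)
      rw [if_pos (by omega)]
      simp
  rw [h2, pvBest_zero_final _ post _ pre.length r.1 (by omega)]

-- A's per-element chain picks exactly the first matching element and its least-priority rule
theorem pv_eq_all (xs : List String) : map_classes_py xs = map_classes_py_alt xs := by
  induction xs with
  | nil => rfl
  | cons c rest ih =>
    rw [map_classes_py]
    set lc := PySem.Str.lower c with hlc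
    have hmap : (c :: rest).map PySem.Str.lower = lc :: rest.map PySem.Str.lower := by
      simp [hlc]
    by_cases h1 : PySem.Str.isIn "event" lc
    · have hres : pvBest (lc :: List.map PySem.Str.lower rest) pvRules 0 none
          = some (0, 0, "Event") :=
        pvBest_first_match lc (List.map PySem.Str.lower rest)
          []
          ("Event", ["event"])
          [("Agent", ["agent", "species", "ethnicgroup", "language"]), ("Place", ["place"]), ("TimePeriod", ["timeperiod"]), ("TopicalConcept", ["topicalconcept"]), ("CulturalArtifact", ["work"]), ("MaterialObject", ["materialobject", "meanoftransportation", "currency", "device", "food", "chemicalsubstance"])]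
          (by intro q hq; exact absurd hq (List.not_mem_nil))
          (by rw [pv_any_one]; exact h1)
      have hB : map_classes_py_alt (c :: rest) = "Event" := by
        unfold map_classes_py_alt
        rw [hmap, hres]
      rw [if_pos h1, hB]
    · by_cases h2 : ["agent", "species", "ethnicgroup", "language"].any (fun agent => PySem.Str.isIn agent lc)
      · have hres : pvBest (lc :: List.map PySem.Str.lower rest) pvRules 0 none
            = some (0, 1, "Agent") :=
          pvBest_first_match lc (List.map PySem.Str.lower rest)
            [("Event", ["event"])]
            ("Agent", ["agent", "species", "ethnicgroup", "language"])
            [("Place", ["place"]), ("TimePeriod", ["timeperiod"]), ("TopicalConcept", ["topicalconcept"]), ("CulturalArtifact", ["work"]), ("MaterialObject", ["materialobject", "meanoftransportation", "currency", "device", "food", "chemicalsubstance"])]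
            (by
              intro q hq
              fin_cases hq
              · rw [pv_any_one]; exact Bool.eq_false_iff.mpr h1
              )
            (by exact h2)
        have hB : map_classes_py_alt (c :: rest) = "Agent" := by
          unfold map_classes_py_alt
          rw [hmap, hres]
        rw [if_neg h1, if_pos h2, hB]
      · by_cases h3 : PySem.Str.isIn "place" lc
        · have hres : pvBest (lc :: List.map PySem.Str.lower rest) pvRules 0 none
              = some (0, 2, "Place") :=
            pvBest_first_match lc (List.map PySem.Str.lower rest)
              [("Event", ["event"]), ("Agent", ["agent", "species", "ethnicgroup", "language"])]
              ("Place", ["place"])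
              [("TimePeriod", ["timeperiod"]), ("TopicalConcept", ["topicalconcept"]), ("CulturalArtifact", ["work"]), ("MaterialObject", ["materialobject", "meanoftransportation", "currency", "device", "food", "chemicalsubstance"])]
              (by
                intro q hq
                fin_cases hq
                · rw [pv_any_one]; exact Bool.eq_false_iff.mpr h1
                · exact Bool.eq_false_iff.mpr h2
                )
              (by rw [pv_any_one]; exact h3)
          have hB : map_classes_py_alt (c :: rest) = "Place" := by
            unfold map_classes_py_alt
            rw [hmap, hres]
          rw [if_neg h1, if_neg h2, if_pos h3, hB]
        · by_cases h4 : PySem.Str.isIn "timeperiod" lc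
          · have hres : pvBest (lc :: List.map PySem.Str.lower rest) pvRules 0 none
                = some (0, 3, "TimePeriod") :=
              pvBest_first_match lc (List.map PySem.Str.lower rest)
                [("Event", ["event"]), ("Agent", ["agent", "species", "ethnicgroup", "language"]), ("Place", ["place"])]
                ("TimePeriod", ["timeperiod"])
                [("TopicalConcept", ["topicalconcept"]), ("CulturalArtifact", ["work"]), ("MaterialObject", ["materialobject", "meanoftransportation", "currency", "device", "food", "chemicalsubstance"])]
                (by
                  intro q hq
                  fin_cases hq
                  · rw [pv_any_one]; exact Bool.eq_false_iff.mpr h1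
                  · exact Bool.eq_false_iff.mpr h2
                  · rw [pv_any_one]; exact Bool.eq_false_iff.mpr h3
                  )
                (by rw [pv_any_one]; exact h4)
            have hB : map_classes_py_alt (c :: rest) = "TimePeriod" := by
              unfold map_classes_py_alt
              rw [hmap, hres]
            rw [if_neg h1, if_neg h2, if_neg h3, if_pos h4, hB]
          · by_cases h5 : PySem.Str.isIn "topicalconcept" lc
            · have hres : pvBest (lc :: List.map PySem.Str.lower rest) pvRules 0 none
                  = some (0, 4, "TopicalConcept") :=
                pvBest_first_match lc (List.map PySem.Str.lower rest)
                  [("Event", ["event"]), ("Agent", ["agent", "species", "ethnicgroup", "language"]), ("Place", ["place"]), ("TimePeriod", ["timeperiod"])]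
                  ("TopicalConcept", ["topicalconcept"])
                  [("CulturalArtifact", ["work"]), ("MaterialObject", ["materialobject", "meanoftransportation", "currency", "device", "food", "chemicalsubstance"])]
                  (by
                    intro q hq
                    fin_cases hq
                    · rw [pv_any_one]; exact Bool.eq_false_iff.mpr h1
                    · exact Bool.eq_false_iff.mpr h2
                    · rw [pv_any_one]; exact Bool.eq_false_iff.mpr h3
                    · rw [pv_any_one]; exact Bool.eq_false_iff.mpr h4
                    )
                  (by rw [pv_any_one]; exact h5)
              have hB : map_classes_py_alt (c :: rest) = "TopicalConcept" := by
                unfold map_classes_py_alt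
                rw [hmap, hres]
              rw [if_neg h1, if_neg h2, if_neg h3, if_neg h4, if_pos h5, hB]
            · by_cases h6 : PySem.Str.isIn "work" lc
              · have hres : pvBest (lc :: List.map PySem.Str.lower rest) pvRules 0 none
                    = some (0, 5, "CulturalArtifact") :=
                  pvBest_first_match lc (List.map PySem.Str.lower rest)
                    [("Event", ["event"]), ("Agent", ["agent", "species", "ethnicgroup", "language"]), ("Place", ["place"]), ("TimePeriod", ["timeperiod"]), ("TopicalConcept", ["topicalconcept"])]
                    ("CulturalArtifact", ["work"])
                    [("MaterialObject", ["materialobject", "meanoftransportation", "currency", "device", "food", "chemicalsubstance"])]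
                    (by
                      intro q hq
                      fin_cases hq
                      · rw [pv_any_one]; exact Bool.eq_false_iff.mpr h1
                      · exact Bool.eq_false_iff.mpr h2
                      · rw [pv_any_one]; exact Bool.eq_false_iff.mpr h3
                      · rw [pv_any_one]; exact Bool.eq_false_iff.mpr h4
                      · rw [pv_any_one]; exact Bool.eq_false_iff.mpr h5
                      )
                    (by rw [pv_any_one]; exact h6)
                have hB : map_classes_py_alt (c :: rest) = "CulturalArtifact" := by
                  unfold map_classes_py_alt
                  rw [hmap, hres]
                rw [if_neg h1, if_neg h2, if_neg h3, if_neg h4, if_neg h5, if_pos h6, hB]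
              · by_cases h7 : ["materialobject", "meanoftransportation", "currency", "device", "food", "chemicalsubstance"].any (fun matObj => PySem.Str.isIn matObj lc)
                · have hres : pvBest (lc :: List.map PySem.Str.lower rest) pvRules 0 none
                      = some (0, 6, "MaterialObject") :=
                    pvBest_first_match lc (List.map PySem.Str.lower rest)
                      [("Event", ["event"]), ("Agent", ["agent", "species", "ethnicgroup", "language"]), ("Place", ["place"]), ("TimePeriod", ["timeperiod"]), ("TopicalConcept", ["topicalconcept"]), ("CulturalArtifact", ["work"])]
                      ("MaterialObject", ["materialobject", "meanoftransportation", "currency", "device", "food", "chemicalsubstance"])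
                      []
                      (by
                        intro q hq
                        fin_cases hq
                        · rw [pv_any_one]; exact Bool.eq_false_iff.mpr h1
                        · exact Bool.eq_false_iff.mpr h2
                        · rw [pv_any_one]; exact Bool.eq_false_iff.mpr h3
                        · rw [pv_any_one]; exact Bool.eq_false_iff.mpr h4
                        · rw [pv_any_one]; exact Bool.eq_false_iff.mpr h5
                        · rw [pv_any_one]; exact Bool.eq_false_iff.mpr h6
                        )
                      (by exact h7)
                  have hB : map_classes_py_alt (c :: rest) = "MaterialObject" := by
                    unfold map_classes_py_alt
                    rw [hmap, hres]
                  rw [if_neg h1, if_neg h2, if_neg h3, if_neg h4, if_neg h5, if_neg h6, if_pos h7, hB]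
                · have hall : ∀ r ∈ pvRules, r.2.any (fun k => PySem.Str.isIn k lc) = false := by
                    intro r hrm
                    fin_cases hrm
                    · rw [pv_any_one]; exact Bool.eq_false_iff.mpr h1
                    · exact Bool.eq_false_iff.mpr h2
                    · rw [pv_any_one]; exact Bool.eq_false_iff.mpr h3
                    · rw [pv_any_one]; exact Bool.eq_false_iff.mpr h4
                    · rw [pv_any_one]; exact Bool.eq_false_iff.mpr h5
                    · rw [pv_any_one]; exact Bool.eq_false_iff.mpr h6
                    · exact Bool.eq_false_iff.mpr h7
                  have hs := pvBest_shift lc (List.map PySem.Str.lower rest) pvRules 0 none hall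
                  unfold map_classes_py_alt
                  rw [hmap]
                  rw [show (pvShift none : Option (Nat × Nat × String)) = none from rfl] at hs
                  rw [hs]
                  rw [if_neg h1, if_neg h2, if_neg h3, if_neg h4, if_neg h5, if_neg h6, if_neg h7, ih]
                  unfold map_classes_py_alt
                  cases pvBest (List.map PySem.Str.lower rest) pvRules 0 none with
                  | none => rfl
                  | some t => rfl

-- ===== VERDICT (by name: the statement is the Claim_ definition above) =====
theorem map_classes_py_spec : Claim_equal_map_classes_py := by
  intro xs _
  exact pv_eq_all xs
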